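-- pv_equiv track=rewrite | github.com/SandeepPaul22/court-data-fetcher | court_scraper/scraper.py | _map_field
-- ===== SOURCE A (Python) =====
-- from typing import Dict, List, Optional, Any
--
-- def _map_field(label: str, value: str) -> Dict[str, str]:
--     """
--     Map extracted labels to standard field names
--     """
--     label_lower = label.lower()
--     field_mapping = {}
--
--     # Map various label formats to standard fields
--     if any(term in label_lower for term in ['petitioner', 'appellant', 'plaintiff']):
--         field_mapping['petitioner'] = value
--     elif any(term in label_lower for term in ['respondent', 'defendant']):
--         field_mapping['respondent'] = value
--     elif any(term in label_lower for term in ['filing', 'filed', 'registration']):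
--         field_mapping['filing_date'] = value
--     elif any(term in label_lower for term in ['next', 'hearing', 'date']):
--         field_mapping['hearing_date'] = value
--     elif any(term in label_lower for term in ['status', 'stage']):
--         field_mapping['status'] = value
--     elif any(term in label_lower for term in ['judge', 'justice', 'court']):
--         field_mapping['judge'] = value
--     elif any(term in label_lower for term in ['title', 'case']):
--         field_mapping['case_title'] = value
--
--     return field_mapping
-- ===== SOURCE B (Python) =====
-- _TERM_INDEX = {
--     'petitioner': (0, 'petitioner'), 'appellant': (0, 'petitioner'), 'plaintiff': (0, 'petitioner'),
--     'respondent': (1, 'respondent'), 'defendant': (1, 'respondent'),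
--     'filing': (2, 'filing_date'), 'filed': (2, 'filing_date'), 'registration': (2, 'filing_date'),
--     'next': (3, 'hearing_date'), 'hearing': (3, 'hearing_date'), 'date': (3, 'hearing_date'),
--     'status': (4, 'status'), 'stage': (4, 'status'),
--     'judge': (5, 'judge'), 'justice': (5, 'judge'), 'court': (5, 'judge'),
--     'title': (6, 'case_title'), 'case': (6, 'case_title'),
-- }
--
-- def _map_field(label: str, value: str) -> dict:
--     """Map a label to a standard field name: every keyword is looked up in a flat
--     inverted index term -> (priority, field); the field of minimal priority among
--     all matching terms wins (a min-reduction, no branch chain, no early exit)."""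
--     label_lower = label.lower()
--     best = None
--     for term, (prio, field) in _TERM_INDEX.items():
--         if term in label_lower and (best is None or prio < best[0]):
--             best = (prio, field)
--     return {} if best is None else {best[1]: value}
-- ===== Notes on version B (the rewrite author's own statement) =====
-- stated objective: alternative
-- what changed: Replaced the seven-branch if/elif chain of any()-scans with a flat inverted keyword index term->(priority,field) traversed once with a min-priority reduction (no branch chain, no per-rule any(), no early exit).
import Mathlib
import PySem

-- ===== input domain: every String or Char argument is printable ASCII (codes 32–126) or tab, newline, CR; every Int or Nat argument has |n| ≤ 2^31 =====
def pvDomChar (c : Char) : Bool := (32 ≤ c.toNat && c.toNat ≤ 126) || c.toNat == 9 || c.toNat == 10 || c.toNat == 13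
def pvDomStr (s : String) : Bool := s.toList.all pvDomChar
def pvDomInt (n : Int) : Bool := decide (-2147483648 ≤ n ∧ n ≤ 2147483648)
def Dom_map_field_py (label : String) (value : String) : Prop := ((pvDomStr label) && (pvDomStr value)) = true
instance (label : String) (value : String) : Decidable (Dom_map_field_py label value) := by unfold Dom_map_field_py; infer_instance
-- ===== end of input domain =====

-- B replaces A's seven-branch if/elif chain by a flat inverted keyword index scanned once with a min-priority reduction (alternative; same cost).

-- ===== PORT A =====
-- literal transliteration of A: lower the label, empty dict, if/elif chain inserting into it, return the dict
def map_field_py (label : String) (value : String) : List (String × String) :=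
  let label_lower := PySem.Str.lower label
  let field_mapping : PySem.Dict String String := PySem.Dict.empty
  let field_mapping :=
    if ["petitioner", "appellant", "plaintiff"].any (fun term => PySem.Str.isIn term label_lower) then
      field_mapping.insert "petitioner" value
    else if ["respondent", "defendant"].any (fun term => PySem.Str.isIn term label_lower) then
      field_mapping.insert "respondent" value
    else if ["filing", "filed", "registration"].any (fun term => PySem.Str.isIn term label_lower) then
      field_mapping.insert "filing_date" value
    else if ["next", "hearing", "date"].any (fun term => PySem.Str.isIn term label_lower) then
      field_mapping.insert "hearing_date" value
    else if ["status", "stage"].any (fun term => PySem.Str.isIn term label_lower) then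
      field_mapping.insert "status" value
    else if ["judge", "justice", "court"].any (fun term => PySem.Str.isIn term label_lower) then
      field_mapping.insert "judge" value
    else if ["title", "case"].any (fun term => PySem.Str.isIn term label_lower) then
      field_mapping.insert "case_title" value
    else field_mapping
  field_mapping.items

-- ===== PORT B =====
-- Source B's inverted index term -> (priority, field), in dict insertion order
def pvTermIndex : List (String × Nat × String) :=
  [("petitioner", 0, "petitioner"), ("appellant", 0, "petitioner"), ("plaintiff", 0, "petitioner"),
   ("respondent", 1, "respondent"), ("defendant", 1, "respondent"),
   ("filing", 2, "filing_date"), ("filed", 2, "filing_date"), ("registration", 2, "filing_date"),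
   ("next", 3, "hearing_date"), ("hearing", 3, "hearing_date"), ("date", 3, "hearing_date"),
   ("status", 4, "status"), ("stage", 4, "status"),
   ("judge", 5, "judge"), ("justice", 5, "judge"), ("court", 5, "judge"),
   ("title", 6, "case_title"), ("case", 6, "case_title")]

-- Source B's loop body: keep the matching entry of minimal priority
def pvStep (ll : String) (best : Option (Nat × String)) (e : String × Nat × String) : Option (Nat × String) :=
  if PySem.Str.isIn e.1 ll then
    match best with
    | none => some (e.2.1, e.2.2)
    | some (q, _) => if e.2.1 < q then some (e.2.1, e.2.2) else best
  else best

-- transliteration of Source B: one fold over the inverted index, then build the result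
def map_field_py_alt (label : String) (value : String) : List (String × String) :=
  let label_lower := PySem.Str.lower label
  match pvTermIndex.foldl (pvStep label_lower) none with
  | none => []
  | some (_, f) => [(f, value)]

-- ===== PRECONDITION & SPEC =====
def Spec_map_field_py (label : String) (value : String) (out : List (String × String)) : Prop := out = map_field_py_alt label value
instance (label : String) (value : String) (out : List (String × String)) : Decidable (Spec_map_field_py label value out) := by unfold Spec_map_field_py; infer_instance

-- ===== CLAIM (what is proved, stated in full; the proofs are below) =====
def Claim_equal_map_field_py : Prop := ∀ (label : String) (value : String), Dom_map_field_py label value → Spec_map_field_py label value (map_field_py label value)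

-- ===== LEMMAS AND PROOFS =====

-- A's if/elif chain expressed as the (priority, field) it selects
def pvChain (ll : String) : Option (Nat × String) :=
  if ["petitioner", "appellant", "plaintiff"].any (fun term => PySem.Str.isIn term ll) then some (0, "petitioner")
  else if ["respondent", "defendant"].any (fun term => PySem.Str.isIn term ll) then some (1, "respondent")
  else if ["filing", "filed", "registration"].any (fun term => PySem.Str.isIn term ll) then some (2, "filing_date")
  else if ["next", "hearing", "date"].any (fun term => PySem.Str.isIn term ll) then some (3, "hearing_date")
  else if ["status", "stage"].any (fun term => PySem.Str.isIn term ll) then some (4, "status")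
  else if ["judge", "justice", "court"].any (fun term => PySem.Str.isIn term ll) then some (5, "judge")
  else if ["title", "case"].any (fun term => PySem.Str.isIn term ll) then some (6, "case_title")
  else none

-- once the accumulator holds a priority no later entry beats, the fold is stuck
theorem pv_stuck (ll : String) (p : Nat) (f : String) (l : List (String × Nat × String))
    (h : ∀ e ∈ l, p ≤ e.2.1) :
    l.foldl (pvStep ll) (some (p, f)) = some (p, f) := by
  induction l with
  | nil => rfl
  | cons e t ih =>
    simp only [List.foldl_cons, pvStep]
    have hp : ¬ e.2.1 < p := not_lt.mpr (h e (List.mem_cons_self))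
    rw [if_neg hp]
    have := ih (fun x hx => h x (List.mem_cons_of_mem e hx))
    split <;> exact this

theorem pv_fold_eq_chain (ll : String) :
    pvTermIndex.foldl (pvStep ll) none = pvChain ll := by
  unfold pvTermIndex
  cases h1 : PySem.Str.isIn "petitioner" ll with
  | true =>
    rw [List.foldl_cons, show pvStep ll none ("petitioner", 0, "petitioner") = some (0, "petitioner") from by unfold pvStep; rw [h1]; simp]
    rw [pv_stuck ll 0 "petitioner" _ (by decide)]
    simp_all [pvChain, List.any_cons, List.any_nil]
  | false =>
    rw [List.foldl_cons, show pvStep ll none ("petitioner", 0, "petitioner") = none from by unfold pvStep; rw [h1]; simp]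
    cases h2 : PySem.Str.isIn "appellant" ll with
    | true =>
      rw [List.foldl_cons, show pvStep ll none ("appellant", 0, "petitioner") = some (0, "petitioner") from by unfold pvStep; rw [h2]; simp]
      rw [pv_stuck ll 0 "petitioner" _ (by decide)]
      simp_all [pvChain, List.any_cons, List.any_nil]
    | false =>
      rw [List.foldl_cons, show pvStep ll none ("appellant", 0, "petitioner") = none from by unfold pvStep; rw [h2]; simp]
      cases h3 : PySem.Str.isIn "plaintiff" ll with
      | true =>
        rw [List.foldl_cons, show pvStep ll none ("plaintiff", 0, "petitioner") = some (0, "petitioner") from by unfold pvStep; rw [h3]; simp]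
        rw [pv_stuck ll 0 "petitioner" _ (by decide)]
        simp_all [pvChain, List.any_cons, List.any_nil]
      | false =>
        rw [List.foldl_cons, show pvStep ll none ("plaintiff", 0, "petitioner") = none from by unfold pvStep; rw [h3]; simp]
        cases h4 : PySem.Str.isIn "respondent" ll with
        | true =>
          rw [List.foldl_cons, show pvStep ll none ("respondent", 1, "respondent") = some (1, "respondent") from by unfold pvStep; rw [h4]; simp]
          rw [pv_stuck ll 1 "respondent" _ (by decide)]
          simp_all [pvChain, List.any_cons, List.any_nil]
        | false =>
          rw [List.foldl_cons, show pvStep ll none ("respondent", 1, "respondent") = none from by unfold pvStep; rw [h4]; simp]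
          cases h5 : PySem.Str.isIn "defendant" ll with
          | true =>
            rw [List.foldl_cons, show pvStep ll none ("defendant", 1, "respondent") = some (1, "respondent") from by unfold pvStep; rw [h5]; simp]
            rw [pv_stuck ll 1 "respondent" _ (by decide)]
            simp_all [pvChain, List.any_cons, List.any_nil]
          | false =>
            rw [List.foldl_cons, show pvStep ll none ("defendant", 1, "respondent") = none from by unfold pvStep; rw [h5]; simp]
            cases h6 : PySem.Str.isIn "filing" ll with
            | true =>
              rw [List.foldl_cons, show pvStep ll none ("filing", 2, "filing_date") = some (2, "filing_date") from by unfold pvStep; rw [h6]; simp]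
              rw [pv_stuck ll 2 "filing_date" _ (by decide)]
              simp_all [pvChain, List.any_cons, List.any_nil]
            | false =>
              rw [List.foldl_cons, show pvStep ll none ("filing", 2, "filing_date") = none from by unfold pvStep; rw [h6]; simp]
              cases h7 : PySem.Str.isIn "filed" ll with
              | true =>
                rw [List.foldl_cons, show pvStep ll none ("filed", 2, "filing_date") = some (2, "filing_date") from by unfold pvStep; rw [h7]; simp]
                rw [pv_stuck ll 2 "filing_date" _ (by decide)]
                simp_all [pvChain, List.any_cons, List.any_nil]
              | false =>
                rw [List.foldl_cons, show pvStep ll none ("filed", 2, "filing_date") = none from by unfold pvStep; rw [h7]; simp]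
                cases h8 : PySem.Str.isIn "registration" ll with
                | true =>
                  rw [List.foldl_cons, show pvStep ll none ("registration", 2, "filing_date") = some (2, "filing_date") from by unfold pvStep; rw [h8]; simp]
                  rw [pv_stuck ll 2 "filing_date" _ (by decide)]
                  simp_all [pvChain, List.any_cons, List.any_nil]
                | false =>
                  rw [List.foldl_cons, show pvStep ll none ("registration", 2, "filing_date") = none from by unfold pvStep; rw [h8]; simp]
                  cases h9 : PySem.Str.isIn "next" ll with
                  | true =>
                    rw [List.foldl_cons, show pvStep ll none ("next", 3, "hearing_date") = some (3, "hearing_date") from by unfold pvStep; rw [h9]; simp]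
                    rw [pv_stuck ll 3 "hearing_date" _ (by decide)]
                    simp_all [pvChain, List.any_cons, List.any_nil]
                  | false =>
                    rw [List.foldl_cons, show pvStep ll none ("next", 3, "hearing_date") = none from by unfold pvStep; rw [h9]; simp]
                    cases h10 : PySem.Str.isIn "hearing" ll with
                    | true =>
                      rw [List.foldl_cons, show pvStep ll none ("hearing", 3, "hearing_date") = some (3, "hearing_date") from by unfold pvStep; rw [h10]; simp]
                      rw [pv_stuck ll 3 "hearing_date" _ (by decide)]
                      simp_all [pvChain, List.any_cons, List.any_nil]
                    | false =>
                      rw [List.foldl_cons, show pvStep ll none ("hearing", 3, "hearing_date") = none from by unfold pvStep; rw [h10]; simp]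
                      cases h11 : PySem.Str.isIn "date" ll with
                      | true =>
                        rw [List.foldl_cons, show pvStep ll none ("date", 3, "hearing_date") = some (3, "hearing_date") from by unfold pvStep; rw [h11]; simp]
                        rw [pv_stuck ll 3 "hearing_date" _ (by decide)]
                        simp_all [pvChain, List.any_cons, List.any_nil]
                      | false =>
                        rw [List.foldl_cons, show pvStep ll none ("date", 3, "hearing_date") = none from by unfold pvStep; rw [h11]; simp]
                        cases h12 : PySem.Str.isIn "status" ll with
                        | true =>
                          rw [List.foldl_cons, show pvStep ll none ("status", 4, "status") = some (4, "status") from by unfold pvStep; rw [h12]; simp]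
                          rw [pv_stuck ll 4 "status" _ (by decide)]
                          simp_all [pvChain, List.any_cons, List.any_nil]
                        | false =>
                          rw [List.foldl_cons, show pvStep ll none ("status", 4, "status") = none from by unfold pvStep; rw [h12]; simp]
                          cases h13 : PySem.Str.isIn "stage" ll with
                          | true =>
                            rw [List.foldl_cons, show pvStep ll none ("stage", 4, "status") = some (4, "status") from by unfold pvStep; rw [h13]; simp]
                            rw [pv_stuck ll 4 "status" _ (by decide)]
                            simp_all [pvChain, List.any_cons, List.any_nil]
                          | false =>
                            rw [List.foldl_cons, show pvStep ll none ("stage", 4, "status") = none from by unfold pvStep; rw [h13]; simp]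
                            cases h14 : PySem.Str.isIn "judge" ll with
                            | true =>
                              rw [List.foldl_cons, show pvStep ll none ("judge", 5, "judge") = some (5, "judge") from by unfold pvStep; rw [h14]; simp]
                              rw [pv_stuck ll 5 "judge" _ (by decide)]
                              simp_all [pvChain, List.any_cons, List.any_nil]
                            | false =>
                              rw [List.foldl_cons, show pvStep ll none ("judge", 5, "judge") = none from by unfold pvStep; rw [h14]; simp]
                              cases h15 : PySem.Str.isIn "justice" ll with
                              | true =>
                                rw [List.foldl_cons, show pvStep ll none ("justice", 5, "judge") = some (5, "judge") from by unfold pvStep; rw [h15]; simp]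
                                rw [pv_stuck ll 5 "judge" _ (by decide)]
                                simp_all [pvChain, List.any_cons, List.any_nil]
                              | false =>
                                rw [List.foldl_cons, show pvStep ll none ("justice", 5, "judge") = none from by unfold pvStep; rw [h15]; simp]
                                cases h16 : PySem.Str.isIn "court" ll with
                                | true =>
                                  rw [List.foldl_cons, show pvStep ll none ("court", 5, "judge") = some (5, "judge") from by unfold pvStep; rw [h16]; simp]
                                  rw [pv_stuck ll 5 "judge" _ (by decide)]
                                  simp_all [pvChain, List.any_cons, List.any_nil]
                                | false =>
                                  rw [List.foldl_cons, show pvStep ll none ("court", 5, "judge") = none from by unfold pvStep; rw [h16]; simp]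
                                  cases h17 : PySem.Str.isIn "title" ll with
                                  | true =>
                                    rw [List.foldl_cons, show pvStep ll none ("title", 6, "case_title") = some (6, "case_title") from by unfold pvStep; rw [h17]; simp]
                                    rw [pv_stuck ll 6 "case_title" _ (by decide)]
                                    simp_all [pvChain, List.any_cons, List.any_nil]
                                  | false =>
                                    rw [List.foldl_cons, show pvStep ll none ("title", 6, "case_title") = none from by unfold pvStep; rw [h17]; simp]
                                    cases h18 : PySem.Str.isIn "case" ll with
                                    | true =>
                                      rw [List.foldl_cons, show pvStep ll none ("case", 6, "case_title") = some (6, "case_title") from by unfold pvStep; rw [h18]; simp]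
                                      simp_all [pvChain, List.any_cons, List.any_nil]
                                    | false =>
                                      rw [List.foldl_cons, show pvStep ll none ("case", 6, "case_title") = none from by unfold pvStep; rw [h18]; simp]
                                      simp_all [pvChain, List.any_cons, List.any_nil]

-- ===== VERDICT (by name: the statement is the Claim_ definition above) =====
theorem map_field_py_spec : Claim_equal_map_field_py := by
  intro label value _
  unfold Spec_map_field_py map_field_py map_field_py_alt
  simp only [pv_fold_eq_chain, pvChain]
  split_ifs <;> rfl
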